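-- pv_equiv track=rewrite | github.com/ernestoBocini/Brain-Like-Computation-Project | utils.py | transform_to_8_classes
-- ===== SOURCE A (Python) =====
-- def transform_to_8_classes(objects):
--     '''
--     Transform the input list of objects into one of 8 classes: animals, boats, cars, chairs, faces, fruits, planes, or tables.
--     Args:
--         objects (list of str): A list of object names, where each name corresponds to one of the 64 classes.
--     Returns:
--         transformed_objects (list of str): A list of object names, where each name corresponds to one of the 8 classes.
--     '''
--
--     fruits = ['apple', 'apricot', 'peach', 'pear', 'raspberry', 'strawberry', 'walnut', 'watermelon']
--     animals = ['bear', 'cow', 'dog', 'elephant', 'gorilla', 'hedgehog', 'lioness', 'turtle']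
--     objects = ['face' if 'face' in s else s for s in objects]
--     objects = ['car' if 'car' in s else s for s in objects]
--     objects = ['chair' if 'chair' in s else s for s in objects]
--     objects = ['airplane' if 'airplane' in s else s for s in objects]
--     objects = ['table' if 'table' in s else s for s in objects]
--     objects = ['fruit' if s in fruits else s for s in objects]
--     objects = ['animal' if s in animals else s for s in objects]
--     objects = ['ship' if 'ship' in s else s for s in objects]
--     return objects
-- ===== SOURCE B (Python) =====
-- def transform_to_8_classes(objects):
--     fruits = ['apple', 'apricot', 'peach', 'pear', 'raspberry', 'strawberry', 'walnut', 'watermelon']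
--     animals = ['bear', 'cow', 'dog', 'elephant', 'gorilla', 'hedgehog', 'lioness', 'turtle']
--
--     def classify(s):
--         if 'face' in s:
--             return 'face'
--         if 'car' in s:
--             return 'car'
--         if 'chair' in s:
--             return 'chair'
--         if 'airplane' in s:
--             return 'airplane'
--         if 'table' in s:
--             return 'table'
--         if s in fruits:
--             return 'fruit'
--         if s in animals:
--             return 'animal'
--         if 'ship' in s:
--             return 'ship'
--         return s
--
--     return [classify(s) for s in objects]
-- ===== Notes on version B (the rewrite author's own statement) =====
-- stated objective: idiomatic
-- what changed: Replaced A's eight sequential whole-list rewrite passes by a single per-element if/elif classification cascade applied in one pass over the input, relying on the replacement labels never matching a later rule.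
import Mathlib
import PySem

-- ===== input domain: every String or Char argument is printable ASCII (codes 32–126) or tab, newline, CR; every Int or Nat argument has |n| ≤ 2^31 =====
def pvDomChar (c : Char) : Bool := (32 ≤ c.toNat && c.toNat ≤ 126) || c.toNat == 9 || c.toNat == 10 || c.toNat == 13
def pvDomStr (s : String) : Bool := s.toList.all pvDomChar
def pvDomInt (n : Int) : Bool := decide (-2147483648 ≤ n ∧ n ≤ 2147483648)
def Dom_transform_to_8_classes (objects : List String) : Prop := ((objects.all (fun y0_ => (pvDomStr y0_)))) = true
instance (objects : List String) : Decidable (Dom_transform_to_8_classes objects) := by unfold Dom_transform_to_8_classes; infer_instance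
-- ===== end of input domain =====

-- B replaces A's eight sequential whole-list rewrite passes by a single per-element if/elif cascade (idiomatic one-pass classification); same return values.


-- ===== PORT A =====
def pvFruits : List String := ["apple", "apricot", "peach", "pear", "raspberry", "strawberry", "walnut", "watermelon"]
def pvAnimals : List String := ["bear", "cow", "dog", "elephant", "gorilla", "hedgehog", "lioness", "turtle"]

-- A: eight sequential whole-list comprehension passes over the same list
def transform_to_8_classes (objects : List String) : List String :=
  let objects := objects.map (fun s => if PySem.Str.isIn "face" s then "face" else s)
  let objects := objects.map (fun s => if PySem.Str.isIn "car" s then "car" else s)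
  let objects := objects.map (fun s => if PySem.Str.isIn "chair" s then "chair" else s)
  let objects := objects.map (fun s => if PySem.Str.isIn "airplane" s then "airplane" else s)
  let objects := objects.map (fun s => if PySem.Str.isIn "table" s then "table" else s)
  let objects := objects.map (fun s => if s ∈ pvFruits then "fruit" else s)
  let objects := objects.map (fun s => if s ∈ pvAnimals then "animal" else s)
  let objects := objects.map (fun s => if PySem.Str.isIn "ship" s then "ship" else s)
  objects

-- ===== PORT B =====
-- B: one if/elif cascade per element, applied in a single pass
def pvClassify (s : String) : String :=
  if PySem.Str.isIn "face" s then "face"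
  else if PySem.Str.isIn "car" s then "car"
  else if PySem.Str.isIn "chair" s then "chair"
  else if PySem.Str.isIn "airplane" s then "airplane"
  else if PySem.Str.isIn "table" s then "table"
  else if s ∈ pvFruits then "fruit"
  else if s ∈ pvAnimals then "animal"
  else if PySem.Str.isIn "ship" s then "ship"
  else s

def transform_to_8_classes_alt (objects : List String) : List String :=
  objects.map pvClassify

-- ===== PRECONDITION & SPEC =====
def Spec_transform_to_8_classes (objects : List String) (out : List String) : Prop := out = transform_to_8_classes_alt objects
instance (objects : List String) (out : List String) : Decidable (Spec_transform_to_8_classes objects out) := by unfold Spec_transform_to_8_classes; infer_instance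

-- ===== CLAIM (what is proved, stated in full; the proofs are below) =====
def Claim_equal_transform_to_8_classes : Prop := ∀ (objects : List String), Dom_transform_to_8_classes objects → Spec_transform_to_8_classes objects (transform_to_8_classes objects)

-- ===== LEMMAS AND PROOFS =====

-- A's per-pass element transformers, named for the proof (definitionally the lambdas in the port of A)
def pvStep1 (t : String) : String := if PySem.Str.isIn "face" t then "face" else t
def pvStep2 (t : String) : String := if PySem.Str.isIn "car" t then "car" else t
def pvStep3 (t : String) : String := if PySem.Str.isIn "chair" t then "chair" else t
def pvStep4 (t : String) : String := if PySem.Str.isIn "airplane" t then "airplane" else t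
def pvStep5 (t : String) : String := if PySem.Str.isIn "table" t then "table" else t
def pvStep6 (t : String) : String := if t ∈ pvFruits then "fruit" else t
def pvStep7 (t : String) : String := if t ∈ pvAnimals then "animal" else t
def pvStep8 (t : String) : String := if PySem.Str.isIn "ship" t then "ship" else t

-- composing A's eight passes on one element equals B's cascade
theorem pvPointwise (s : String) :
    pvStep8 (pvStep7 (pvStep6 (pvStep5 (pvStep4 (pvStep3 (pvStep2 (pvStep1 s))))))) = pvClassify s := by
  unfold pvClassify
  by_cases h1 : PySem.Str.isIn "face" s
  · have e1 : pvStep1 s = "face" := by unfold pvStep1; rw [if_pos h1]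
    rw [e1, if_pos h1]; decide
  have e1 : pvStep1 s = s := by unfold pvStep1; rw [if_neg h1]
  rw [e1, if_neg h1]
  by_cases h2 : PySem.Str.isIn "car" s
  · have e2 : pvStep2 s = "car" := by unfold pvStep2; rw [if_pos h2]
    rw [e2, if_pos h2]; decide
  have e2 : pvStep2 s = s := by unfold pvStep2; rw [if_neg h2]
  rw [e2, if_neg h2]
  by_cases h3 : PySem.Str.isIn "chair" s
  · have e3 : pvStep3 s = "chair" := by unfold pvStep3; rw [if_pos h3]
    rw [e3, if_pos h3]; decide
  have e3 : pvStep3 s = s := by unfold pvStep3; rw [if_neg h3]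
  rw [e3, if_neg h3]
  by_cases h4 : PySem.Str.isIn "airplane" s
  · have e4 : pvStep4 s = "airplane" := by unfold pvStep4; rw [if_pos h4]
    rw [e4, if_pos h4]; decide
  have e4 : pvStep4 s = s := by unfold pvStep4; rw [if_neg h4]
  rw [e4, if_neg h4]
  by_cases h5 : PySem.Str.isIn "table" s
  · have e5 : pvStep5 s = "table" := by unfold pvStep5; rw [if_pos h5]
    rw [e5, if_pos h5]; decide
  have e5 : pvStep5 s = s := by unfold pvStep5; rw [if_neg h5]
  rw [e5, if_neg h5]
  by_cases h6 : s ∈ pvFruits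
  · have e6 : pvStep6 s = "fruit" := by unfold pvStep6; rw [if_pos h6]
    rw [e6, if_pos h6]; decide
  have e6 : pvStep6 s = s := by unfold pvStep6; rw [if_neg h6]
  rw [e6, if_neg h6]
  by_cases h7 : s ∈ pvAnimals
  · have e7 : pvStep7 s = "animal" := by unfold pvStep7; rw [if_pos h7]
    rw [e7, if_pos h7]; decide
  have e7 : pvStep7 s = s := by unfold pvStep7; rw [if_neg h7]
  rw [e7, if_neg h7]
  by_cases h8 : PySem.Str.isIn "ship" s
  · have e8 : pvStep8 s = "ship" := by unfold pvStep8; rw [if_pos h8]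
    rw [e8, if_pos h8]
  have e8 : pvStep8 s = s := by unfold pvStep8; rw [if_neg h8]
  rw [e8]
  exact (if_neg h8).symm

-- ===== VERDICT (by name: the statement is the Claim_ definition above) =====
theorem transform_to_8_classes_spec : Claim_equal_transform_to_8_classes := by
  intro objects _
  show transform_to_8_classes objects = transform_to_8_classes_alt objects
  have hA : transform_to_8_classes objects =
      ((((((((objects.map pvStep1).map pvStep2).map pvStep3).map pvStep4).map pvStep5).map pvStep6).map pvStep7).map pvStep8) := rfl
  rw [hA, List.map_map, List.map_map, List.map_map, List.map_map, List.map_map, List.map_map, List.map_map]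
  refine List.map_congr_left fun s _ => ?_
  simp only [Function.comp_apply]
  exact pvPointwise s
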